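-- pv_equiv track=rewrite | github.com/xamfoo/advent-of-code-2023 | day02/main.py | power_of
-- ===== SOURCE A (Python) =====
-- import math
--
-- def power_of(games):
--     result = []
--     for game in games:
--         color_to_maxcount = {}
--         for aset in game:
--             for color, count in aset.items():
--                 color_to_maxcount[color] = int(
--                     max(count, color_to_maxcount.get(color, 0))
--                 )
--         result.append(math.prod(color_to_maxcount.values()))
--     return result
-- ===== SOURCE B (Python) =====
-- import math
--
-- def power_of(games):
--     result = []
--     for game in games:
--         # distinct colors in first-appearance order
--         colors = []
--         seen = set()
--         for aset in game:
--             for c in aset: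
--                 if c not in seen:
--                     seen.add(c)
--                     colors.append(c)
--         result.append(math.prod(
--             max(0, *(aset.get(c, 0) for aset in game)) for c in colors
--         ))
--     return result
-- ===== Notes on version B (the rewrite author's own statement) =====
-- stated objective: alternative
-- what changed: A folds every (color,count) pair once into an incrementally-updated dict of running maxima and multiplies its values; B first collects the distinct colors of the game, then for each color rescans all the game's sets taking the maximum count (missing colors as 0) and multiplies those maxima.
import Mathlib
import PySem

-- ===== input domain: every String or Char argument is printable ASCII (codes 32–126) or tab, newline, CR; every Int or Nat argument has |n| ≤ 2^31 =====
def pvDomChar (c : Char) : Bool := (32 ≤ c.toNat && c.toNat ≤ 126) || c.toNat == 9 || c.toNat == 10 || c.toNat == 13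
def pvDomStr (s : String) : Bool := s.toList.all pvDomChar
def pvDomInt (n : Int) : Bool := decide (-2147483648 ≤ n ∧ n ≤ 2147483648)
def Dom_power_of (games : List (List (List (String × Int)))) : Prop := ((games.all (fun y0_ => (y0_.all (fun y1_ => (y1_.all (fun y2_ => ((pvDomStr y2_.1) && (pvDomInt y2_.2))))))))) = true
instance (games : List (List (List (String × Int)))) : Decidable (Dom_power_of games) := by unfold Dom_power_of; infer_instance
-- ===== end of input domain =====

-- B replaces A's single incremental max-dict with: collect the distinct colors, then a per-color
-- rescan of the game's sets taking max (objective: alternative decomposition, same cost class).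

-- ===== PORT A =====
-- A: for each game, fold every (color, count) pair into a dict of running maxima
-- (dict.get default 0), then append the product of the dict's values.
def power_of (games : List (List (List (String × Int)))) : List Int :=
  games.foldl
    (fun result game =>
      let d :=
        game.foldl
          (fun d aset =>
            aset.foldl
              (fun (d : PySem.Dict String Int) p =>
                d.insert p.1 (max p.2 (d.getD p.1 0)))
              d)
          PySem.Dict.empty
      result ++ [d.values.foldl (· * ·) 1])   -- math.prod(values)
    []

-- ===== PORT B =====
-- B: distinct colors in first-appearance order (seen-set loop), then for each color
-- max(0, *(aset.get(c, 0) for aset in game)), and math.prod over the colors.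
def power_of_alt (games : List (List (List (String × Int)))) : List Int :=
  games.map
    (fun game =>
      let colors : PySem.Set String :=
        game.foldl (fun s aset => aset.foldl (fun s p => PySem.Set.add s p.1) s) PySem.Set.empty
      (colors.map
          (fun c => (game.map (fun aset => (PySem.Dict.mk aset).getD c 0)).foldl max 0)).prod)

-- ===== PRECONDITION & SPEC =====
-- Pre_ excludes association lists with a duplicate key inside one inner dict: Python dicts cannot
-- carry duplicate keys, so such Lean inputs correspond to no Python input at all.
def Pre_power_of (games : List (List (List (String × Int)))) : Prop :=
  ∀ game ∈ games, ∀ aset ∈ game, (aset.map Prod.fst).Nodup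
instance (games : List (List (List (String × Int)))) : Decidable (Pre_power_of games) := by
  unfold Pre_power_of; infer_instance

def pvWitness_power_of : (List (List (List (String × Int)))) :=
  [[[("red", 4), ("blue", 3)], [("red", 1), ("green", 2)]], [[("green", 7)]]]

def Spec_power_of (games : List (List (List (String × Int)))) (out : List Int) : Prop := out = power_of_alt games
instance (games : List (List (List (String × Int)))) (out : List Int) : Decidable (Spec_power_of games out) := by unfold Spec_power_of; infer_instance

-- ===== CLAIM (what is proved, stated in full; the proofs are below) =====
def Claim_equal_power_of : Prop := ∀ (games : List (List (List (String × Int)))), Dom_power_of games → Pre_power_of games → Spec_power_of games (power_of games)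


-- ===== LEMMAS AND PROOFS =====

-- A's per-game value (exactly the body of A's outer loop)
def pvValA (game : List (List (String × Int))) : Int :=
  (game.foldl
      (fun d aset =>
        aset.foldl
          (fun (d : PySem.Dict String Int) p => d.insert p.1 (max p.2 (d.getD p.1 0)))
          d)
      PySem.Dict.empty).values.foldl (· * ·) 1

-- B's per-game value (exactly the body of B's map)
def pvValB (game : List (List (String × Int))) : Int :=
  ((game.foldl (fun s aset => aset.foldl (fun s p => PySem.Set.add s p.1) s) PySem.Set.empty).map
      (fun c => (game.map (fun aset => (PySem.Dict.mk aset).getD c 0)).foldl max 0)).prod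

theorem pvFoldlAppendSingleton {α β : Type} (f : α → β) (l : List α) (init : List β) :
    l.foldl (fun r g => r ++ [f g]) init = init ++ l.map f := by
  induction l generalizing init with
  | nil => simp
  | cons a t ih => simp [ih]

theorem pvPowerOfEqMap (games : List (List (List (String × Int)))) :
    power_of games = games.map pvValA := by
  show games.foldl (fun r g => r ++ [pvValA g]) [] = games.map pvValA
  simpa using pvFoldlAppendSingleton pvValA games []

theorem pvGetDFoldl (ps : List (String × Int)) (d : PySem.Dict String Int) (c : String) :
    (ps.foldl (fun (d : PySem.Dict String Int) p => d.insert p.1 (max p.2 (d.getD p.1 0))) d).getD c 0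
      = (ps.filter (fun p => p.1 == c)).foldl (fun m p => max p.2 m) (d.getD c 0) := by
  induction ps generalizing d with
  | nil => rfl
  | cons p t ih =>
    simp only [List.foldl_cons, List.filter_cons]
    by_cases hc : p.1 = c
    · subst hc
      simp only [beq_self_eq_true, if_true, List.foldl_cons, ih,
        PySem.Dict.getD_insert_self]
    · have h1 : (p.1 == c) = false := by simp [hc]
      simp only [h1, Bool.false_eq_true, if_false, ih]
      congr 1
      have hne : ¬ c = p.1 := fun h => hc h.symm
      rw [PySem.Dict.getD_insert, if_neg hne]

theorem pvFilterNil (aset : List (String × Int)) (c : String) (h : c ∉ aset.map Prod.fst) :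
    aset.filter (fun p => p.1 == c) = [] := by
  rw [List.filter_eq_nil_iff]
  intro p hp hpc
  exact h (List.mem_map.mpr ⟨p, hp, by simpa using hpc⟩)

theorem pvPerAset (c : String) (aset : List (String × Int)) (h : (aset.map Prod.fst).Nodup)
    (acc : Int) (hacc : 0 ≤ acc) :
    (aset.filter (fun p => p.1 == c)).foldl (fun m p => max p.2 m) acc
      = max acc ((PySem.Dict.mk aset).getD c 0) := by
  induction aset generalizing acc with
  | nil =>
    simp [PySem.Dict.getD, PySem.Dict.get?, max_eq_left hacc]
  | cons p t ih =>
    simp only [List.map_cons, List.nodup_cons] at h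
    rw [PySem.Dict.getD_eq_get?_getD, PySem.Dict.get?_mk_cons, List.filter_cons]
    by_cases hc : p.1 = c
    · subst hc
      have ht : t.filter (fun q => q.1 == p.1) = [] := pvFilterNil t p.1 h.1
      simp only [beq_self_eq_true, if_true, List.foldl_cons, ht]
      simp [max_comm]
    · have h1 : (p.1 == c) = false := by simp [hc]
      simp only [h1, Bool.false_eq_true, if_false]
      rw [← PySem.Dict.getD_eq_get?_getD]
      exact ih h.2 acc hacc

theorem pvPerColor (c : String) (game : List (List (String × Int)))
    (h : ∀ a ∈ game, (a.map Prod.fst).Nodup) (acc : Int) (hacc : 0 ≤ acc) :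
    (game.flatten.filter (fun p => p.1 == c)).foldl (fun m p => max p.2 m) acc
      = (game.map (fun a => (PySem.Dict.mk a).getD c 0)).foldl max acc := by
  induction game generalizing acc with
  | nil => rfl
  | cons a t ih =>
    simp only [List.flatten_cons, List.filter_append, List.foldl_append, List.map_cons,
      List.foldl_cons]
    rw [pvPerAset c a (h a (by simp)) acc hacc]
    exact ih (fun x hx => h x (by simp [hx])) _ (le_trans hacc (le_max_left _ _))

theorem pvColors (game : List (List (String × Int))) :
    game.foldl (fun s aset => aset.foldl (fun s p => PySem.Set.add s p.1) s) PySem.Set.empty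
      = PySem.Set.ofList (game.flatten.map Prod.fst) := by
  have key : ∀ (g : List (List (String × Int))) (s : PySem.Set String),
      g.foldl (fun s aset => aset.foldl (fun s p => PySem.Set.add s p.1) s) s
        = PySem.Set.update s (g.flatten.map Prod.fst) := by
    intro g
    induction g with
    | nil => intro s; rfl
    | cons a t ih =>
      intro s
      rw [List.foldl_cons, ih, ← PySem.Set.update_map_eq_foldl_add,
        List.flatten_cons, List.map_append, ← PySem.Set.update_append]
  rw [key]
  show PySem.Set.update [] (game.flatten.map Prod.fst) = _
  rw [PySem.Set.update_nil_left]

theorem pvValAB (game : List (List (String × Int))) (h : ∀ a ∈ game, (a.map Prod.fst).Nodup) :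
    pvValA game = pvValB game := by
  unfold pvValA pvValB
  have hkeys :
      (game.foldl
          (fun d aset =>
            aset.foldl
              (fun (d : PySem.Dict String Int) p => d.insert p.1 (max p.2 (d.getD p.1 0)))
              d)
          PySem.Dict.empty).keys = PySem.Set.ofList (game.flatten.map Prod.fst) := by
    rw [← List.foldl_flatten]
    rw [PySem.Dict.keys_foldl_insert_key (key := Prod.fst)
      (f := fun (d : PySem.Dict String Int) p => max p.2 (d.getD p.1 0))]
    rw [PySem.Dict.keys_empty, PySem.Set.update_nil_left]
  have hnd :
      (game.foldl
          (fun d aset =>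
            aset.foldl
              (fun (d : PySem.Dict String Int) p => d.insert p.1 (max p.2 (d.getD p.1 0)))
              d)
          PySem.Dict.empty).keys.Nodup := by
    rw [← List.foldl_flatten]
    exact PySem.Dict.nodup_keys_foldl_insert_key _ Prod.fst _ _ PySem.Dict.nodup_keys_empty
  rw [PySem.Dict.values_eq_map_keys _ hnd 0, ← List.prod_eq_foldl, hkeys, pvColors]
  congr 1
  apply List.map_congr_left
  intro c _
  rw [← List.foldl_flatten, pvGetDFoldl, PySem.Dict.getD_empty]
  exact pvPerColor c game h 0 le_rfl


theorem power_of_spec : Claim_equal_power_of := by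
  intro games _ hpre
  show power_of games = power_of_alt games
  rw [pvPowerOfEqMap]
  show games.map pvValA = games.map pvValB
  exact List.map_congr_left (fun g hg => pvValAB g (hpre g hg))
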